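-- pv_equiv track=rewrite | github.com/akman12914/platform-demo | ceil_panel_final.py | split_rows_by_max_height
-- ===== SOURCE A (Python) =====
-- from typing import List, Tuple, Optional, Literal, Dict, Set
--
-- def split_rows_by_max_height(total_W: int, max_h: int) -> List[int]:
--     """
--     total_W를 '패널이 커버할 수 있는 최대 높이(max_h)'로 위에서부터 잘라 내려가고,
--     마지막에 남은 만큼만 한 행으로 두는 함수.
--     - 균등분할이 아니라, max_h, max_h, ..., remainder 형태
--     - 수직 절단 횟수 최소화
--     """
--     total_W = int(total_W)
--     if total_W <= 0:
--         return []
--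
--     # 한 행으로 충분히 커버되면 그대로
--     if total_W <= max_h:
--         return [total_W]
--
--     parts: List[int] = []
--     remain = total_W
--
--     # max_h 단위로 자르기
--     while remain > max_h:
--         parts.append(max_h)
--         remain -= max_h
--
--     # 마지막 잔여 폭
--     if remain > 0:
--         parts.append(remain)
--
--     return parts
-- ===== SOURCE B (Python) =====
-- def split_rows_by_max_height(total_W: int, max_h: int):
--     total_W = int(total_W)
--     if total_W <= 0:
--         return []
--     q, r = divmod(total_W, max_h)
--     return [max_h] * q + ([r] if r else [])
-- ===== Notes on version B (the rewrite author's own statement) =====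
-- stated objective: simpler
-- what changed: Replaces the repeated-subtraction while-loop that appends max_h chunks with a single divmod: the result list is built directly as [max_h]*q plus the remainder if nonzero.
import Mathlib
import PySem

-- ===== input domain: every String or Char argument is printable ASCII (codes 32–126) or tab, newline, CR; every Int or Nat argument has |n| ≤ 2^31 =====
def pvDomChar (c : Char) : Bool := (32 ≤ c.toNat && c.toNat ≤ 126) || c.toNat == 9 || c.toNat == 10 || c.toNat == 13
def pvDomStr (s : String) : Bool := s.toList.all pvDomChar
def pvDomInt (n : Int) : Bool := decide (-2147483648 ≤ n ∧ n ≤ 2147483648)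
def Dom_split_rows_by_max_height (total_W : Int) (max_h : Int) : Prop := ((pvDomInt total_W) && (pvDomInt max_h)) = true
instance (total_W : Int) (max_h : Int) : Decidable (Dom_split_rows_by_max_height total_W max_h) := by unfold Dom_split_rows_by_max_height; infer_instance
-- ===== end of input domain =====

-- B replaces A's repeated-subtraction loop with a single divmod; Pre_ excludes max_h ≤ 0 with
-- positive total_W, where A's while-loop never terminates.


-- ===== PORT A =====
-- the `while remain > max_h` loop; the extra `0 < max_h` guard only makes the recursion
-- terminate in Lean (in Python the loop diverges when max_h ≤ 0 < remain, excluded by Pre_)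
def splitLoopA (max_h : Int) (remain : Int) (parts : List Int) : List Int :=
  if _h : max_h > 0 ∧ remain > max_h then
    splitLoopA max_h (remain - max_h) (parts ++ [max_h])
  else
    if remain > 0 then parts ++ [remain] else parts
termination_by remain.toNat
decreasing_by omega

def split_rows_by_max_height (total_W : Int) (max_h : Int) : List Int :=
  if total_W ≤ 0 then []
  else if total_W ≤ max_h then [total_W]
  else splitLoopA max_h total_W []

-- ===== PORT B =====
def split_rows_by_max_height_alt (total_W : Int) (max_h : Int) : List Int :=
  if total_W ≤ 0 then []
  else
    match PySem.Int.divmod? total_W max_h with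
    | some (q, r) => List.replicate q.toNat max_h ++ (if r ≠ 0 then [r] else [])
    | none => []  -- ZeroDivisionError in Python (max_h = 0, excluded by Pre_)

-- ===== PRECONDITION & SPEC =====
-- Pre_ excludes exactly the inputs on which A does not return: for total_W > 0 and
-- max_h ≤ 0 the while-loop in A never terminates (and B raises ZeroDivisionError at max_h = 0).
def Pre_split_rows_by_max_height (total_W : Int) (max_h : Int) : Prop := total_W ≤ 0 ∨ 0 < max_h
instance (total_W : Int) (max_h : Int) : Decidable (Pre_split_rows_by_max_height total_W max_h) := by unfold Pre_split_rows_by_max_height; infer_instance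
def pvWitness_split_rows_by_max_height : Int × Int := (7, 3)

def Spec_split_rows_by_max_height (total_W : Int) (max_h : Int) (out : List Int) : Prop := out = split_rows_by_max_height_alt total_W max_h
instance (total_W : Int) (max_h : Int) (out : List Int) : Decidable (Spec_split_rows_by_max_height total_W max_h out) := by unfold Spec_split_rows_by_max_height; infer_instance

-- ===== CLAIM (what is proved, stated in full; the proofs are below) =====
def Claim_equal_split_rows_by_max_height : Prop := ∀ (total_W : Int) (max_h : Int), Dom_split_rows_by_max_height total_W max_h → Pre_split_rows_by_max_height total_W max_h → Spec_split_rows_by_max_height total_W max_h (split_rows_by_max_height total_W max_h)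

-- ===== LEMMAS AND PROOFS =====

-- bounds characterising Python floor-division for a positive divisor
theorem pv_fd_bounds (a b : Int) (hb : 0 < b) :
    PySem.Int.floordiv a b * b ≤ a ∧ a < (PySem.Int.floordiv a b + 1) * b :=
  (PySem.Int.floordiv_eq_iff_of_pos hb).mp rfl

-- the loop's result, for 0 < max_h, 0 < remain, is parts ++ replicate q max_h ++ [r if r ≠ 0]
theorem splitLoopA_eq (max_h remain : Int) (hm : 0 < max_h) (hr : 0 < remain) (parts : List Int) :
    splitLoopA max_h remain parts =
      parts ++ (List.replicate (PySem.Int.floordiv remain max_h).toNat max_h ++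
        (if PySem.Int.mod remain max_h ≠ 0 then [PySem.Int.mod remain max_h] else [])) := by
  rw [splitLoopA]
  by_cases hgt : remain > max_h
  · simp only [hm, hgt, and_self, dite_true]
    rw [splitLoopA_eq max_h (remain - max_h) hm (by omega) (parts ++ [max_h])]
    have hq := pv_fd_bounds (remain - max_h) max_h hm
    have hd : PySem.Int.floordiv remain max_h = PySem.Int.floordiv (remain - max_h) max_h + 1 := by
      rw [PySem.Int.floordiv_eq_iff_of_pos hm]
      constructor <;> nlinarith [hq.1, hq.2]
    have hmod : PySem.Int.mod remain max_h = PySem.Int.mod (remain - max_h) max_h := by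
      have h1 := PySem.Int.floordiv_mul_add_mod remain max_h
      have h2 := PySem.Int.floordiv_mul_add_mod (remain - max_h) max_h
      rw [hd] at h1
      nlinarith [h1, h2]
    have hqn : 0 ≤ PySem.Int.floordiv (remain - max_h) max_h := by nlinarith [hq.1, hq.2]
    have hdn : (PySem.Int.floordiv remain max_h).toNat =
        (PySem.Int.floordiv (remain - max_h) max_h).toNat + 1 := by omega
    rw [hmod, hdn, List.replicate_succ]
    simp
  · simp only [hm, hgt, and_false, dite_false, if_pos hr]
    rcases lt_or_eq_of_le (le_of_not_gt hgt) with hlt | heq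
    · have hd : PySem.Int.floordiv remain max_h = 0 := by
        rw [PySem.Int.floordiv_eq_iff_of_pos hm]
        constructor <;> simp <;> omega
      have hmod : PySem.Int.mod remain max_h = remain := by
        have h1 := PySem.Int.floordiv_mul_add_mod remain max_h
        rw [hd] at h1; simpa using h1
      simp [hd, hmod, hr.ne']
    · subst heq
      have hd : PySem.Int.floordiv remain remain = 1 := by
        rw [PySem.Int.floordiv_eq_iff_of_pos hm]
        constructor <;> omega
      have hmod : PySem.Int.mod remain remain = 0 := by
        have h1 := PySem.Int.floordiv_mul_add_mod remain remain
        rw [hd] at h1; omega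
      simp [hd, hmod]
termination_by remain.toNat
decreasing_by omega

-- ===== VERDICT (by name: the statement is the Claim_ definition above) =====
theorem split_rows_by_max_height_spec : Claim_equal_split_rows_by_max_height := by
  intro total_W max_h _ hpre
  unfold Spec_split_rows_by_max_height split_rows_by_max_height split_rows_by_max_height_alt
  by_cases h0 : total_W ≤ 0
  · simp [h0]
  · have hm : 0 < max_h := by rcases hpre with h | h; exact absurd h h0; exact h
    have hne : max_h ≠ 0 := hm.ne'
    simp only [h0, if_false]
    rw [show PySem.Int.divmod? total_W max_h
        = some (PySem.Int.floordiv total_W max_h, PySem.Int.mod total_W max_h) by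
      simp [PySem.Int.divmod?, PySem.Int.floordiv, PySem.Int.mod, hne]]
    by_cases hle : total_W ≤ max_h
    · rcases lt_or_eq_of_le hle with hlt | heq
      · have hd : PySem.Int.floordiv total_W max_h = 0 := by
          rw [PySem.Int.floordiv_eq_iff_of_pos hm]
          constructor <;> simp <;> omega
        have hmod : PySem.Int.mod total_W max_h = total_W := by
          have h1 := PySem.Int.floordiv_mul_add_mod total_W max_h
          rw [hd] at h1; simpa using h1
        simp [hle, hd, hmod, show total_W ≠ 0 by omega]
      · subst heq
        have hd : PySem.Int.floordiv total_W total_W = 1 := by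
          rw [PySem.Int.floordiv_eq_iff_of_pos hm]
          constructor <;> omega
        have hmod : PySem.Int.mod total_W total_W = 0 := by
          have h1 := PySem.Int.floordiv_mul_add_mod total_W total_W
          rw [hd] at h1; omega
        simp [hd, hmod]
    · simp only [hle, if_false]
      rw [splitLoopA_eq max_h total_W hm (by omega) []]
      simp
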